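-- pv_equiv track=rewrite | github.com/yjohbjects/algorythme | 프로그래머스/lv0/120815. 피자 나눠 먹기 （2）/피자 나눠 먹기 （2）.py | solution
-- ===== SOURCE A (Python) =====
-- def solution(n):
--     answer = 0
--     piece = n
--
--     while True:
--         if piece % 6 == 0:
--             answer = piece // 6
--             break
--         else:
--             piece += n
--             continue
--
--     return answer
-- ===== SOURCE B (Python) =====
-- from math import gcd
--
-- def solution(n):
--     # closed form: smallest multiple of n divisible by 6 is lcm(n,6); divided by 6 gives n // gcd(n, 6)
--     return n // gcd(n, 6)
-- ===== Notes on version B (the rewrite author's own statement) =====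
-- stated objective: simpler
-- what changed: Replaced the while-loop searching for the first multiple of n divisible by 6 with the closed form n // gcd(n, 6).
import Mathlib
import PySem

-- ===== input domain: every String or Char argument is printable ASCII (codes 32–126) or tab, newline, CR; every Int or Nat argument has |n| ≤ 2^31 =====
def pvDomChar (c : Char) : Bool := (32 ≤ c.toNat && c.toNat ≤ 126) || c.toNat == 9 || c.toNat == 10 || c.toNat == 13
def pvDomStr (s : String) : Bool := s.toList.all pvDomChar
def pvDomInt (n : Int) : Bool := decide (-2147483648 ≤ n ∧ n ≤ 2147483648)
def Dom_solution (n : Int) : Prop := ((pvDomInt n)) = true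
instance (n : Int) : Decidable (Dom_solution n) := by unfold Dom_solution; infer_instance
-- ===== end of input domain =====

-- B replaces A's while-loop over multiples of n with the closed form n // gcd(n, 6): simpler, no loop.

-- ===== PORT A =====
-- A's while-loop: piece starts at n and grows by n until divisible by 6.
-- Fuel 6 only makes the recursion total: the 6th value checked is 6*n, which is
-- always divisible by 6, so the fuel is never exhausted.
def solLoop (n : Int) : Nat → Int → Int
  | 0, _ => 0
  | f + 1, piece =>
    if PySem.Int.mod piece 6 = 0 then PySem.Int.floordiv piece 6
    else solLoop n f (piece + n)

def solution (n : Int) : Int := solLoop n 6 n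

-- ===== PORT B =====
def solution_alt (n : Int) : Int := PySem.Int.floordiv n (Int.gcd n 6)

-- ===== PRECONDITION & SPEC =====
def Spec_solution (n : Int) (out : Int) : Prop := out = solution_alt n
instance (n : Int) (out : Int) : Decidable (Spec_solution n out) := by unfold Spec_solution; infer_instance

-- ===== CLAIM (what is proved, stated in full; the proofs are below) =====
def Claim_equal_solution : Prop := ∀ (n : Int), Dom_solution n → Spec_solution n (solution n)

-- ===== LEMMAS AND PROOFS =====

-- gcd(n,6) is determined by n % 6
theorem gcd_six_of_emod (n : Int) : (Int.gcd n 6 : Int) = Int.gcd (n % 6) 6 := by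
  rw [Int.gcd_emod]

theorem solution_eq_alt (n : Int) : solution n = solution_alt n := by
  have h6 : (0:Int) < 6 := by norm_num
  have hr : n % 6 = 0 ∨ n % 6 = 1 ∨ n % 6 = 2 ∨ n % 6 = 3 ∨ n % 6 = 4 ∨ n % 6 = 5 := by omega
  have hg : (Int.gcd n 6 : Int) = Int.gcd (n % 6) 6 := gcd_six_of_emod n
  unfold solution solution_alt
  unfold solLoop
  unfold solLoop
  unfold solLoop
  unfold solLoop
  unfold solLoop
  unfold solLoop
  simp only [PySem.Int.mod_eq_emod_of_pos h6, PySem.Int.floordiv_eq_ediv_of_pos h6]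
  rcases hr with h | h | h | h | h | h <;>
    · rw [h] at hg
      rw [hg]
      norm_num [Int.gcd]
      split_ifs <;> omega

-- ===== VERDICT (by name: the statement is the Claim_ definition above) =====
theorem solution_spec : Claim_equal_solution := by
  intro n _
  unfold Spec_solution
  exact solution_eq_alt n
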